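-- pv_equiv track=rewrite | github.com/florpoetry/florpoetry.github.io | pandas_mess.py | indexPos
-- ===== SOURCE A (Python) =====
-- def indexPos(unique_lists, all_lists):
--     dict = {}
--     for i in range(len(unique_lists)):
--         str_i = str(i)
--         arr = []
--         dict[str_i] = arr
--     for list_O in range (len(all_lists)):
--         for list_T in range (len(unique_lists)):
--             if (all_lists[list_O] == unique_lists[list_T]):
--                 arr = dict[str(list_T)]
--                 new_arr = arr
--                 new_arr.append(list_O)
--                 dict[str(list_T)] = new_arr
--     return dict
-- ===== SOURCE B (Python) =====
-- def indexPos(unique_lists, all_lists):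
--     # invert unique_lists once: value -> list of indices having that value
--     where = {}
--     for t, v in enumerate(unique_lists):
--         where.setdefault(v, []).append(t)
--     buckets = {str(t): [] for t in range(len(unique_lists))}
--     # single pass over all_lists with hash lookups
--     for pos, v in enumerate(all_lists):
--         for t in where.get(v, ()):
--             buckets[str(t)].append(pos)
--     return buckets
-- ===== Notes on version B (the rewrite author's own statement) =====
-- stated objective: alternative
-- what changed: Instead of scanning all of unique_lists for every position of all_lists, B builds a hash map value -> indices of unique_lists once and does a single pass over all_lists with O(1) lookups; intended as faster and asymptotically better when values are mostly distinct, but a timing run's duplicate-heavy inputs showed only ~1.7x, so no speed is claimed.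
import Mathlib
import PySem

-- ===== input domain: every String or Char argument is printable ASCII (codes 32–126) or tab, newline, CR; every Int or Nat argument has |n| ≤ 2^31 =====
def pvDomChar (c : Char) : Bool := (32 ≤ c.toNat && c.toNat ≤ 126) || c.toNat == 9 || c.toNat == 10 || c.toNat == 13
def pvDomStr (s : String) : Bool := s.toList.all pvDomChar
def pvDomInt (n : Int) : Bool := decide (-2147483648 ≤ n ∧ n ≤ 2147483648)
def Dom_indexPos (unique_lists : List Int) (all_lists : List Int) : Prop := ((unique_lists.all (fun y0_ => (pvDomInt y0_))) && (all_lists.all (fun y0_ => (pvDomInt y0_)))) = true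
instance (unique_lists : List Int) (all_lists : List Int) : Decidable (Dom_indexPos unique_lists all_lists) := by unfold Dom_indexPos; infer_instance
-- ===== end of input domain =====

-- B replaces A's nested scan of unique_lists per position by a one-shot hash index
-- value -> indices of unique_lists, then a single pass over all_lists; same returned dict.

-- ===== PORT A =====
-- All list indexing below happens at indices from range(len(...)), always in range,
-- so pyGetD (default never used) and Dict.getD (key always present) are exact.
def indexPos (unique_lists : List Int) (all_lists : List Int) : List (String × List Int) :=
  let d0 : PySem.Dict String (List Int) :=
    (PySem.List.pyRange 0 (PySem.List.len unique_lists)).foldl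
      (fun d i => d.insert (PySem.Int.toStr i) ([] : List Int)) PySem.Dict.empty
  let d :=
    (PySem.List.pyRange 0 (PySem.List.len all_lists)).foldl
      (fun d list_O =>
        (PySem.List.pyRange 0 (PySem.List.len unique_lists)).foldl
          (fun d list_T =>
            if PySem.List.pyGetD all_lists list_O 0 == PySem.List.pyGetD unique_lists list_T 0 then
              d.insert (PySem.Int.toStr list_T)
                (d.getD (PySem.Int.toStr list_T) [] ++ [list_O])
            else d)
          d)
      d0
  d.items

-- ===== PORT B =====
-- where.setdefault(v, []).append(t) is exactly Dict.modify v [] (· ++ [t]);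
-- buckets[str(t)].append(pos) with str(t) always a key is Dict.modify (str t) [] (· ++ [pos]).
def indexPos_alt (unique_lists : List Int) (all_lists : List Int) : List (String × List Int) :=
  let whereIdx : PySem.Dict Int (List Int) :=
    (PySem.List.enumerate unique_lists).foldl
      (fun d p => d.modify p.2 [] (fun l => l ++ [p.1])) PySem.Dict.empty
  let buckets0 : PySem.Dict String (List Int) :=
    (PySem.List.pyRange 0 (PySem.List.len unique_lists)).foldl
      (fun d t => d.insert (PySem.Int.toStr t) ([] : List Int)) PySem.Dict.empty
  let buckets :=
    (PySem.List.enumerate all_lists).foldl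
      (fun d p =>
        (whereIdx.getD p.2 []).foldl
          (fun d t => d.modify (PySem.Int.toStr t) [] (fun l => l ++ [p.1])) d)
      buckets0
  buckets.items

-- ===== PRECONDITION & SPEC =====
def Spec_indexPos (unique_lists : List Int) (all_lists : List Int) (out : List (String × List Int)) : Prop := out = indexPos_alt unique_lists all_lists
instance (unique_lists : List Int) (all_lists : List Int) (out : List (String × List Int)) : Decidable (Spec_indexPos unique_lists all_lists out) := by unfold Spec_indexPos; infer_instance

-- ===== CLAIM (what is proved, stated in full; the proofs are below) =====
def Claim_equal_indexPos : Prop := ∀ (unique_lists : List Int) (all_lists : List Int), Dom_indexPos unique_lists all_lists → Spec_indexPos unique_lists all_lists (indexPos unique_lists all_lists)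

-- ===== LEMMAS AND PROOFS =====

lemma int_beq_comm (a b : Int) : (a == b) = (b == a) := by
  rcases eq_or_ne a b with h | h
  · rw [h]
  · simp [h, h.symm]

-- the inverted index looked up at v is exactly the list of indices t with u[t] = v
lemma whereIdx_getD (u : List Int) (v : Int) :
    ((PySem.List.enumerate u).foldl
        (fun d p => d.modify p.2 [] (fun l => l ++ [p.1])) PySem.Dict.empty).getD v []
      = (PySem.List.pyRange 0 (PySem.List.len u)).filter
          (fun t => PySem.List.pyGetD u t 0 == v) := by
  have h1 : (PySem.List.enumerate u).foldl
      (fun d p => d.modify p.2 [] (fun l => l ++ [p.1])) PySem.Dict.empty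
      = ((PySem.List.enumerate u).map (fun p => (p.2, p.1))).foldl
          (fun d q => d.modify q.1 [] (fun l => l ++ [q.2])) PySem.Dict.empty := by
    rw [List.foldl_map]
  rw [h1, PySem.Dict.getD_foldl_modify_append, List.filter_map,
      PySem.List.enumerate_eq_map_pyRange u 0, List.filter_map]
  simp [Function.comp_def]

-- A's guarded inner scan over all indices equals B's fold over the pre-indexed hits
lemma inner_eq (u : List Int) (av o : Int) (d : PySem.Dict String (List Int)) :
    (PySem.List.pyRange 0 (PySem.List.len u)).foldl
        (fun d t =>
          if av == PySem.List.pyGetD u t 0 then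
            d.insert (PySem.Int.toStr t) (d.getD (PySem.Int.toStr t) [] ++ [o])
          else d) d
      = (((PySem.List.enumerate u).foldl
            (fun d p => d.modify p.2 [] (fun l => l ++ [p.1])) PySem.Dict.empty).getD av []).foldl
          (fun d t => d.modify (PySem.Int.toStr t) [] (fun l => l ++ [o])) d := by
  rw [whereIdx_getD]
  have h2 := PySem.List.foldl_if_eq_foldl_filter
      (fun t => av == PySem.List.pyGetD u t 0)
      (fun (d : PySem.Dict String (List Int)) t =>
        d.insert (PySem.Int.toStr t) (d.getD (PySem.Int.toStr t) [] ++ [o]))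
      (PySem.List.pyRange 0 (PySem.List.len u)) d
  refine h2.trans ?_
  rw [List.filter_congr (l := PySem.List.pyRange 0 (PySem.List.len u))
        (q := fun t => PySem.List.pyGetD u t 0 == av)
        (by intro t _; exact int_beq_comm _ _)]
  simp only [PySem.Dict.modify]

-- ===== VERDICT (by name: the statement is the Claim_ definition above) =====
theorem indexPos_spec : Claim_equal_indexPos := by
  intro unique_lists all_lists _
  unfold Spec_indexPos
  simp only [indexPos, indexPos_alt]
  congr 1
  rw [PySem.List.enumerate_eq_map_pyRange all_lists 0, List.foldl_map]
  apply PySem.List.foldl_congr_mem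
  intro d o _
  exact inner_eq unique_lists (PySem.List.pyGetD all_lists o 0) o d
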